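-- pv_equiv track=rewrite | github.com/shubh-chawda/fin-ratio-projectile-aero | src/timestep_sensitivity.py | _pick_primary_metric
-- ===== SOURCE A (Python) =====
-- from typing import Dict, List
--
-- def _pick_primary_metric(cols: List[str]) -> str:
--     """
--     Fallback headline metric selection if k_eff_kg_per_m is not present.
--     """
--     lowered = [c.lower() for c in cols]
--
--     for i, c in enumerate(lowered):
--         if "k_eff" in c:
--             return cols[i]
--
--     for i, c in enumerate(lowered):
--         if "range_sim" in c:
--             return cols[i]
--
--     for i, c in enumerate(lowered):
--         if "range" in c:
--             return cols[i]
--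
--     return cols[0] if cols else ""
-- ===== SOURCE B (Python) =====
-- def _pick_primary_metric(cols):
--     best = None  # (rank, column) with the smallest rank seen, earliest wins ties
--     for c in cols:
--         low = c.lower()
--         if "k_eff" in low:
--             r = 1
--         elif "range_sim" in low:
--             r = 2
--         elif "range" in low:
--             r = 3
--         else:
--             continue
--         if best is None or r < best[0]:
--             best = (r, c)
--     if best is not None:
--         return best[1]
--     return cols[0] if cols else ""
-- ===== Notes on version B (the rewrite author's own statement) =====
-- stated objective: alternative
-- what changed: Replaces A's three sequential full scans (one per priority pattern) with a single pass that ranks each lowered column (k_eff=1, range_sim=2, range=3) and keeps the first column whose rank strictly improves the best seen.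
import Mathlib
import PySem

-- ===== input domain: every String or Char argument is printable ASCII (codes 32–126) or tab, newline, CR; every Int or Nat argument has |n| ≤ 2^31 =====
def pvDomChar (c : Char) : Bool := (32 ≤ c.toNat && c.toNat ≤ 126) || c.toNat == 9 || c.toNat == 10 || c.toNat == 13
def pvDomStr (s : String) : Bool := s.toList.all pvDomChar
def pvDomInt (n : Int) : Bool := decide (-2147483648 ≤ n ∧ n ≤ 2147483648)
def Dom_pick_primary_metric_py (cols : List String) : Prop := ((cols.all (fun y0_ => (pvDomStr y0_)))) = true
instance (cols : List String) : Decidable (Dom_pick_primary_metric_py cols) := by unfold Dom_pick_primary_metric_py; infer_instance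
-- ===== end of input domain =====

-- B replaces A's three sequential pattern scans with one ranked single pass over the columns.


-- ===== PORT A =====
-- one 'for i, c in enumerate(lowered): if pat in c: return cols[i]' loop,
-- walking the (original, lowered) pairs
def pvLoopA (pat : String) : List (String × String) → Option String
  | [] => none
  | (orig, low) :: rest =>
    if PySem.Str.isIn pat low then some orig else pvLoopA pat rest

def pick_primary_metric_py (cols : List String) : String :=
  let pairs := cols.zip (cols.map PySem.Str.lower)
  match pvLoopA "k_eff" pairs with
  | some r => r
  | none =>
    match pvLoopA "range_sim" pairs with
    | some r => r
    | none =>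
      match pvLoopA "range" pairs with
      | some r => r
      | none => match cols with | [] => "" | c :: _ => c

-- ===== PORT B =====
def pvRank (low : String) : Option Nat :=
  if PySem.Str.isIn "k_eff" low then some 1
  else if PySem.Str.isIn "range_sim" low then some 2
  else if PySem.Str.isIn "range" low then some 3
  else none

def pvLoopB : List String → Option (Nat × String) → Option (Nat × String)
  | [], best => best
  | c :: rest, best =>
    match pvRank (PySem.Str.lower c) with
    | none => pvLoopB rest best
    | some r =>
      match best with
      | none => pvLoopB rest (some (r, c))
      | some (br, bc) =>
        if r < br then pvLoopB rest (some (r, c)) else pvLoopB rest (some (br, bc))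

def pick_primary_metric_py_alt (cols : List String) : String :=
  match pvLoopB cols none with
  | some (_, c) => c
  | none => match cols with | [] => "" | c :: _ => c

-- ===== PRECONDITION & SPEC =====
def Spec_pick_primary_metric_py (cols : List String) (out : String) : Prop := out = pick_primary_metric_py_alt cols
instance (cols : List String) (out : String) : Decidable (Spec_pick_primary_metric_py cols out) := by unfold Spec_pick_primary_metric_py; infer_instance

-- ===== CLAIM (what is proved, stated in full; the proofs are below) =====
def Claim_equal_pick_primary_metric_py : Prop := ∀ (cols : List String), Dom_pick_primary_metric_py cols → Spec_pick_primary_metric_py cols (pick_primary_metric_py cols)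

-- ===== LEMMAS AND PROOFS =====

-- A's scans expressed on the original column list
def pvFind (pat : String) (cols : List String) : Option String :=
  pvLoopA pat (cols.zip (cols.map PySem.Str.lower))

theorem pvFind_def (pat : String) (cols : List String) :
    pvLoopA pat (cols.zip (cols.map PySem.Str.lower)) = pvFind pat cols := rfl

theorem pvFind_cons (pat c : String) (rest : List String) :
    pvFind pat (c :: rest) =
      if PySem.Str.isIn pat (PySem.Str.lower c) then some c else pvFind pat rest := rfl

-- pvRank evaluation lemmas
theorem rank_keff {low : String} (h : PySem.Str.isIn "k_eff" low = true) :
    pvRank low = some 1 := by unfold pvRank; rw [h]; rfl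

theorem rank_rsim {low : String} (h1 : PySem.Str.isIn "k_eff" low = false)
    (h2 : PySem.Str.isIn "range_sim" low = true) : pvRank low = some 2 := by
  unfold pvRank; rw [h1, h2]; rfl

theorem rank_range {low : String} (h1 : PySem.Str.isIn "k_eff" low = false)
    (h2 : PySem.Str.isIn "range_sim" low = false)
    (h3 : PySem.Str.isIn "range" low = true) : pvRank low = some 3 := by
  unfold pvRank; rw [h1, h2, h3]; rfl

theorem rank_none {low : String} (h1 : PySem.Str.isIn "k_eff" low = false)
    (h2 : PySem.Str.isIn "range_sim" low = false)
    (h3 : PySem.Str.isIn "range" low = false) : pvRank low = none := by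
  unfold pvRank; rw [h1, h2, h3]; rfl

-- pvLoopB step lemmas
theorem loopB_step_none {c : String} {rest : List String} {best : Option (Nat × String)}
    (h : pvRank (PySem.Str.lower c) = none) :
    pvLoopB (c :: rest) best = pvLoopB rest best := by
  simp [pvLoopB, h]

theorem loopB_step_start {c : String} {rest : List String} {r : Nat}
    (h : pvRank (PySem.Str.lower c) = some r) :
    pvLoopB (c :: rest) none = pvLoopB rest (some (r, c)) := by
  simp [pvLoopB, h]

theorem loopB_step_lt {c : String} {rest : List String} {r br : Nat} {bc : String}
    (h : pvRank (PySem.Str.lower c) = some r) (hlt : r < br) :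
    pvLoopB (c :: rest) (some (br, bc)) = pvLoopB rest (some (r, c)) := by
  simp [pvLoopB, h, hlt]

theorem loopB_step_ge {c : String} {rest : List String} {r br : Nat} {bc : String}
    (h : pvRank (PySem.Str.lower c) = some r) (hge : ¬ r < br) :
    pvLoopB (c :: rest) (some (br, bc)) = pvLoopB rest (some (br, bc)) := by
  simp [pvLoopB, h, hge]

-- best rank 1: nothing can improve it
theorem loopB_one (cols : List String) (bc : String) :
    pvLoopB cols (some (1, bc)) = some (1, bc) := by
  induction cols with
  | nil => rfl
  | cons c rest ih =>
    by_cases hk : PySem.Str.isIn "k_eff" (PySem.Str.lower c) = true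
    · rw [loopB_step_ge (rank_keff hk) (by omega), ih]
    · have hk' := Bool.not_eq_true _ |>.mp hk
      by_cases hs : PySem.Str.isIn "range_sim" (PySem.Str.lower c) = true
      · rw [loopB_step_ge (rank_rsim hk' hs) (by omega), ih]
      · have hs' := Bool.not_eq_true _ |>.mp hs
        by_cases hg : PySem.Str.isIn "range" (PySem.Str.lower c) = true
        · rw [loopB_step_ge (rank_range hk' hs' hg) (by omega), ih]
        · have hg' := Bool.not_eq_true _ |>.mp hg
          rw [loopB_step_none (rank_none hk' hs' hg'), ih]

-- best rank 2: only a k_eff column can displace it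
theorem loopB_two (cols : List String) (bc : String) :
    pvLoopB cols (some (2, bc)) =
      match pvFind "k_eff" cols with
      | some c => some (1, c)
      | none => some (2, bc) := by
  induction cols generalizing bc with
  | nil => rfl
  | cons c rest ih =>
    rw [pvFind_cons]
    by_cases hk : PySem.Str.isIn "k_eff" (PySem.Str.lower c) = true
    · rw [loopB_step_lt (rank_keff hk) (by omega), loopB_one, hk]
      rfl
    · have hk' := Bool.not_eq_true _ |>.mp hk
      rw [hk']
      simp only [Bool.false_eq_true, if_false]
      by_cases hs : PySem.Str.isIn "range_sim" (PySem.Str.lower c) = true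
      · rw [loopB_step_ge (rank_rsim hk' hs) (by omega), ih]
      · have hs' := Bool.not_eq_true _ |>.mp hs
        by_cases hg : PySem.Str.isIn "range" (PySem.Str.lower c) = true
        · rw [loopB_step_ge (rank_range hk' hs' hg) (by omega), ih]
        · have hg' := Bool.not_eq_true _ |>.mp hg
          rw [loopB_step_none (rank_none hk' hs' hg'), ih]

-- best rank 3: first k_eff, then first range_sim, can displace it
theorem loopB_three (cols : List String) (bc : String) :
    pvLoopB cols (some (3, bc)) =
      match pvFind "k_eff" cols with
      | some c => some (1, c)
      | none =>
        match pvFind "range_sim" cols with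
        | some c => some (2, c)
        | none => some (3, bc) := by
  induction cols generalizing bc with
  | nil => rfl
  | cons c rest ih =>
    rw [pvFind_cons, pvFind_cons]
    by_cases hk : PySem.Str.isIn "k_eff" (PySem.Str.lower c) = true
    · rw [loopB_step_lt (rank_keff hk) (by omega), loopB_one, hk]
      rfl
    · have hk' := Bool.not_eq_true _ |>.mp hk
      rw [hk']
      simp only [Bool.false_eq_true, if_false]
      by_cases hs : PySem.Str.isIn "range_sim" (PySem.Str.lower c) = true
      · rw [loopB_step_lt (rank_rsim hk' hs) (by omega), loopB_two, hs]
        cases pvFind "k_eff" rest <;> rfl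
      · have hs' := Bool.not_eq_true _ |>.mp hs
        rw [hs']
        simp only [Bool.false_eq_true, if_false]
        by_cases hg : PySem.Str.isIn "range" (PySem.Str.lower c) = true
        · rw [loopB_step_ge (rank_range hk' hs' hg) (by omega), ih]
        · have hg' := Bool.not_eq_true _ |>.mp hg
          rw [loopB_step_none (rank_none hk' hs' hg'), ih]

-- B's loop started empty, characterised by A's three scans
theorem loopB_none (cols : List String) :
    pvLoopB cols none =
      match pvFind "k_eff" cols with
      | some c => some (1, c)
      | none =>
        match pvFind "range_sim" cols with
        | some c => some (2, c)
        | none =>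
          match pvFind "range" cols with
          | some c => some (3, c)
          | none => none := by
  induction cols with
  | nil => rfl
  | cons c rest ih =>
    rw [pvFind_cons, pvFind_cons, pvFind_cons]
    by_cases hk : PySem.Str.isIn "k_eff" (PySem.Str.lower c) = true
    · rw [loopB_step_start (rank_keff hk), loopB_one, hk]
      rfl
    · have hk' := Bool.not_eq_true _ |>.mp hk
      rw [hk']
      simp only [Bool.false_eq_true, if_false]
      by_cases hs : PySem.Str.isIn "range_sim" (PySem.Str.lower c) = true
      · rw [loopB_step_start (rank_rsim hk' hs), loopB_two, hs]
        cases pvFind "k_eff" rest <;> rfl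
      · have hs' := Bool.not_eq_true _ |>.mp hs
        rw [hs']
        simp only [Bool.false_eq_true, if_false]
        by_cases hg : PySem.Str.isIn "range" (PySem.Str.lower c) = true
        · rw [loopB_step_start (rank_range hk' hs' hg), loopB_three, hg]
          cases pvFind "k_eff" rest <;> cases pvFind "range_sim" rest <;> rfl
        · have hg' := Bool.not_eq_true _ |>.mp hg
          rw [hg']
          simp only [Bool.false_eq_true, if_false]
          rw [loopB_step_none (rank_none hk' hs' hg'), ih]

-- ===== VERDICT (by name: the statement is the Claim_ definition above) =====
theorem pick_primary_metric_py_spec : Claim_equal_pick_primary_metric_py := by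
  intro cols _
  unfold Spec_pick_primary_metric_py pick_primary_metric_py pick_primary_metric_py_alt
  simp only [pvFind_def, loopB_none]
  cases pvFind "k_eff" cols with
  | some c => rfl
  | none =>
    cases pvFind "range_sim" cols with
    | some c => rfl
    | none =>
      cases pvFind "range" cols with
      | some c => rfl
      | none => cases cols <;> rfl
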